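-- pv_equiv track=rewrite | github.com/NodeJSmith/aoc | 2023/day1/puzzle_2.py | replace_string_with_digit
-- ===== SOURCE A (Python) =====
-- DIGIT_STRINGS = {
--     "one": 1,
--     "two": 2,
--     "three": 3,
--     "four": 4,
--     "five": 5,
--     "six": 6,
--     "seven": 7,
--     "eight": 8,
--     "nine": 9,
-- }
--
-- def replace_string_with_digit(line: str) -> str:
--     new_line = line
--
--     i = 0
--     while i < len(line):
--         curr_value = line[i:]
--         for digit_str, digit_int in DIGIT_STRINGS.items():
--             if curr_value.lower().startswith(digit_str):
--                 # something like eightwo should be 82, so we have to include the -1 to account for potential overlap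
--                 new_line = line[0:i] + str(digit_int) + line[i + len(digit_str) - 1 :]
--                 return replace_string_with_digit(new_line)
--         i += 1
--
--     return new_line
-- ===== SOURCE B (Python) =====
-- DIGIT_STRINGS = {
--     "one": 1,
--     "two": 2,
--     "three": 3,
--     "four": 4,
--     "five": 5,
--     "six": 6,
--     "seven": 7,
--     "eight": 8,
--     "nine": 9,
-- }
--
-- def replace_string_with_digit(line: str) -> str:
--     # Single left-to-right pass; after a match, continue from the word's last
--     # character (overlap), instead of rebuilding the string and restarting.
--     out = []
--     i = 0
--     n = len(line)
--     while i < n: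
--         for word, digit in DIGIT_STRINGS.items():
--             if line[i:i + len(word)].lower() == word:
--                 out.append(str(digit))
--                 i += len(word) - 1
--                 break
--         else:
--             out.append(line[i])
--             i += 1
--     return "".join(out)
-- ===== Notes on version B (the rewrite author's own statement) =====
-- stated objective: faster
-- what changed: Instead of rebuilding the string and recursively restarting the scan from index 0 after every replacement, B makes a single left-to-right pass that emits the digit and continues scanning from the overlap position (the matched word's last character).
import Mathlib
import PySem

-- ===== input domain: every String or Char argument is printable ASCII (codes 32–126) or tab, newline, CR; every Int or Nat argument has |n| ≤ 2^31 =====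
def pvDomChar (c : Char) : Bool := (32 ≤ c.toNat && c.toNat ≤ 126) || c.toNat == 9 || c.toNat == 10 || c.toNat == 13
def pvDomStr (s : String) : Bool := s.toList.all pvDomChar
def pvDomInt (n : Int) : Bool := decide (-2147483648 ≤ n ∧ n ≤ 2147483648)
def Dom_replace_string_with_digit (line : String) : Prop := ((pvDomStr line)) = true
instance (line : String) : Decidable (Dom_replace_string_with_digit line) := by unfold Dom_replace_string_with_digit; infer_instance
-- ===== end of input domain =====

-- B replaces A's rebuild-and-restart recursion by a single left-to-right pass that
-- continues from the overlap position; objective: faster (one pass instead of restarting).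


-- ===== PORT A =====

-- the module constant DIGIT_STRINGS (dict, insertion order; keys as char lists)
def pvDigits : List (List Char × Int) :=
  [(['o','n','e'], 1), (['t','w','o'], 2), (['t','h','r','e','e'], 3), (['f','o','u','r'], 4),
   (['f','i','v','e'], 5), (['s','i','x'], 6), (['s','e','v','e','n'], 7),
   (['e','i','g','h','t'], 8), (['n','i','n','e'], 9)]

-- inner `for digit_str, digit_int in DIGIT_STRINGS.items(): if curr_value.lower().startswith(digit_str)`
def aFind (s : List Char) : Option (List Char × Int) :=
  pvDigits.find? (fun p => PySem.Chars.startswith (PySem.Chars.lower s) p.1)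

-- the `while i < len(line)` scan; returns the first (i, digit_str, digit_int) hit
def aLoop (line : List Char) (i : Nat) : Option (Nat × List Char × Int) :=
  if i < line.length then
    match aFind (line.drop i) with
    | some (w, d) => some (i, w, d)
    | none => aLoop line (i + 1)
  else none
termination_by line.length - i

lemma aFind_some_mem {s : List Char} {p : List Char × Int} (h : aFind s = some p) :
    p ∈ pvDigits := List.mem_of_find?_eq_some h

lemma aFind_some_prefix {s w : List Char} {d : Int}
    (h : aFind s = some (w, d)) : w <+: PySem.Chars.lower s := by
  have := List.find?_some h
  exact (PySem.Chars.startswith_iff _ _).mp this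

lemma pvDigits_wordlen : ∀ p ∈ pvDigits, 3 ≤ p.1.length ∧ p.1.length ≤ 5 := by
  have h : pvDigits.all (fun p => decide (3 ≤ p.1.length) && decide (p.1.length ≤ 5)) = true := by
    decide
  intro p hp
  have := List.all_eq_true.mp h p hp
  simp only [Bool.and_eq_true, decide_eq_true_eq] at this
  exact this

lemma pvDigits_dstr_len : ∀ p ∈ pvDigits, (PySem.Int.toStr p.2).toList.length = 1 := by
  have h : pvDigits.all (fun p => (PySem.Int.toStr p.2).toList.length == 1) = true := by decide
  intro p hp
  exact beq_iff_eq.mp (List.all_eq_true.mp h p hp)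

lemma lower_length (s : List Char) : (PySem.Chars.lower s).length = s.length := by
  simp [PySem.Chars.lower]

lemma aFind_some_len {s w : List Char} {d : Int}
    (h : aFind s = some (w, d)) : w.length ≤ s.length := by
  have := (aFind_some_prefix h).length_le
  rwa [lower_length] at this

lemma aLoop_some {line : List Char} {i k : Nat} {w : List Char} {d : Int}
    (h : aLoop line i = some (k, w, d)) :
    k < line.length ∧ aFind (line.drop k) = some (w, d) ∧ i ≤ k ∧
      ∀ j, i ≤ j → j < k → aFind (line.drop j) = none := by
  fun_induction aLoop line i with
  | case1 i hi w' d' hm =>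
    obtain ⟨rfl, rfl, rfl⟩ : i = k ∧ w' = w ∧ d' = d := by
      injection h with h'; injection h' with h1 h2; injection h2 with h3 h4
      exact ⟨h1, h3, h4⟩
    exact ⟨hi, hm, le_rfl, fun j h1 h2 => absurd h1 (by omega)⟩
  | case2 i hi hm ih =>
    obtain ⟨hk, hf, hik, hnone⟩ := ih h
    refine ⟨hk, hf, by omega, fun j h1 h2 => ?_⟩
    rcases Nat.eq_or_lt_of_le h1 with rfl | h1'
    · exact hm
    · exact hnone j h1' h2
  | case3 i hi => simp at h

-- `replace_string_with_digit` (A): find first match, rewrite, recurse on the new string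
def A_core (line : List Char) : List Char :=
  match hm : aLoop line 0 with
  | some (k, w, d) =>
      A_core (line.take k ++ (PySem.Int.toStr d).toList ++ line.drop (k + w.length - 1))
  | none => line
termination_by line.length
decreasing_by
  obtain ⟨hk, hf, -, -⟩ := aLoop_some hm
  have hmem := aFind_some_mem hf
  have hw := (pvDigits_wordlen _ hmem).1
  have hle := aFind_some_len hf
  have hd := pvDigits_dstr_len _ hmem
  simp only [List.length_append, List.length_take, List.length_drop, hd] at *
  omega

def replace_string_with_digit (line : String) : String := String.ofList (A_core line.toList)

-- ===== PORT B =====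

-- `line[i:i+len(word)].lower() == word` at the head of the current suffix
def bMatch (s : List Char) : Option (List Char × Int) :=
  pvDigits.find? (fun p => PySem.Chars.lower (s.take p.1.length) == p.1)

lemma bMatch_some_mem {s : List Char} {p : List Char × Int} (h : bMatch s = some p) :
    p ∈ pvDigits := List.mem_of_find?_eq_some h

-- single pass: on a match emit the digit and continue from the word's last character
def B_loop (cs : List Char) : List Char :=
  match cs with
  | [] => []
  | c :: rest =>
    match hm : bMatch (c :: rest) with
    | some (w, d) =>
        (PySem.Int.toStr d).toList ++ B_loop ((c :: rest).drop (w.length - 1))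
    | none => c :: B_loop rest
termination_by cs.length
decreasing_by
  · have h3 : 3 ≤ w.length := (pvDigits_wordlen _ (bMatch_some_mem hm)).1
    simp only [List.length_drop, List.length_cons]
    omega
  · simp

def replace_string_with_digit_alt (line : String) : String := String.ofList (B_loop line.toList)

-- ===== PRECONDITION & SPEC =====
def Spec_replace_string_with_digit (line : String) (out : String) : Prop := out = replace_string_with_digit_alt line
instance (line : String) (out : String) : Decidable (Spec_replace_string_with_digit line out) := by unfold Spec_replace_string_with_digit; infer_instance

-- ===== CLAIM (what is proved, stated in full; the proofs are below) =====
def Claim_equal_replace_string_with_digit : Prop := ∀ (line : String), Dom_replace_string_with_digit line → Spec_replace_string_with_digit line (replace_string_with_digit line)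

-- ===== LEMMAS AND PROOFS =====

def digitChars : List Char := ['1', '2', '3', '4', '5', '6', '7', '8', '9']

lemma lowerChar_digit : ∀ c ∈ digitChars, PySem.Chars.lowerChar c = c := by
  have h : digitChars.all (fun c => PySem.Chars.lowerChar c == c) = true := by decide
  intro c hc
  exact beq_iff_eq.mp (List.all_eq_true.mp h c hc)

lemma pvDigits_words_nodigit : ∀ p ∈ pvDigits, ∀ c ∈ p.1, c ∉ digitChars := by
  have h : pvDigits.all (fun p => p.1.all (fun c => !(digitChars.contains c))) = true := by decide
  intro p hp c hc
  have := List.all_eq_true.mp (List.all_eq_true.mp h p hp) c hc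
  simpa using this

lemma pvDigits_dstr_digit :
    ∀ p ∈ pvDigits, ∀ c ∈ (PySem.Int.toStr p.2).toList, c ∈ digitChars := by
  have h : pvDigits.all (fun p => (PySem.Int.toStr p.2).toList.all
      (fun c => digitChars.contains c)) = true := by decide
  intro p hp c hc
  have := List.all_eq_true.mp (List.all_eq_true.mp h p hp) c hc
  simpa using this

lemma lower_take (s : List Char) (n : Nat) :
    PySem.Chars.lower (s.take n) = (PySem.Chars.lower s).take n := by
  simp [PySem.Chars.lower, List.map_take]

lemma aFind_eq_bMatch (s : List Char) : aFind s = bMatch s := by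
  unfold aFind bMatch
  congr 1
  funext p
  rw [Bool.eq_iff_iff]
  rw [PySem.Chars.startswith_iff, beq_iff_eq]
  constructor
  · intro h
    rw [lower_take]
    exact (List.prefix_iff_eq_take.mp h).symm
  · intro h
    rw [← h, lower_take]
    exact List.take_prefix _ _

lemma bMatch_nil : bMatch [] = none := by rfl

lemma bMatch_some_len {s w : List Char} {d : Int}
    (h : bMatch s = some (w, d)) : w.length ≤ s.length := by
  rw [← aFind_eq_bMatch] at h
  exact aFind_some_len h

lemma aLoop_none_bMatch {line : List Char} {i : Nat} (h : aLoop line i = none) :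
    ∀ j, i ≤ j → bMatch (line.drop j) = none := by
  fun_induction aLoop line i with
  | case1 i hi w d _ => simp at h
  | case2 i hi hm ih =>
    intro j hij
    rcases Nat.eq_or_lt_of_le hij with rfl | h1
    · rw [← aFind_eq_bMatch]; exact hm
    · exact ih h j h1
  | case3 i hi =>
    intro j hij
    have hd : line.drop j = [] := List.drop_eq_nil_of_le (by omega)
    rw [hd, bMatch_nil]

lemma aLoop_nil : aLoop [] 0 = none := by
  rw [aLoop.eq_def]
  simp

-- B_loop unfolding lemmas
lemma B_loop_nil : B_loop [] = [] := by simp [B_loop]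

lemma B_loop_cons_none {c : Char} {r : List Char} (h : bMatch (c :: r) = none) :
    B_loop (c :: r) = c :: B_loop r := by
  rw [B_loop.eq_def]
  split
  · next heq => exact absurd heq (by simp)
  · next c' r' heq =>
    injection heq with h1 h2
    subst h1; subst h2
    split
    · next w d hm => rw [h] at hm; cases hm
    · rfl

lemma B_loop_cons_some {c : Char} {r w : List Char} {d : Int}
    (h : bMatch (c :: r) = some (w, d)) :
    B_loop (c :: r) = (PySem.Int.toStr d).toList ++ B_loop ((c :: r).drop (w.length - 1)) := by
  rw [B_loop.eq_def]
  split
  · next heq => exact absurd heq (by simp)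
  · next c' r' heq =>
    injection heq with h1 h2
    subst h1; subst h2
    split
    · next w' d' hm =>
      rw [h] at hm
      injection hm with hm'; injection hm' with h1 h2
      subst h1; subst h2; rfl
    · next hm => rw [h] at hm; cases hm

lemma A_core_none {cs : List Char} (h : aLoop cs 0 = none) : A_core cs = cs := by
  rw [A_core.eq_def]
  split
  · next k w d hm => rw [h] at hm; cases hm
  · rfl

lemma A_core_some {cs : List Char} {k : Nat} {w : List Char} {d : Int}
    (h : aLoop cs 0 = some (k, w, d)) :
    A_core cs = A_core (cs.take k ++ (PySem.Int.toStr d).toList ++ cs.drop (k + w.length - 1)) := by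
  rw [A_core.eq_def]
  split
  · next k' w' d' hm =>
    rw [h] at hm
    injection hm with hm'; injection hm' with h1 h2; injection h2 with h3 h4
    subst h1; subst h3; subst h4; rfl
  · next hm => rw [h] at hm; cases hm

-- skipping a match-free prefix: B copies it verbatim
lemma B_skip (P rest : List Char)
    (h : ∀ j < P.length, bMatch ((P ++ rest).drop j) = none) :
    B_loop (P ++ rest) = P ++ B_loop rest := by
  induction P with
  | nil => simp
  | cons c P ih =>
    have h0 := h 0 (by simp)
    simp only [List.cons_append, List.drop_zero] at h0
    rw [List.cons_append, B_loop_cons_none h0, ih (fun j hj => by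
      have := h (j + 1) (by simpa using Nat.succ_lt_succ hj)
      simpa using this)]
    rfl

-- a digit character blocks every word match that would cross it
lemma pred_barrier {wl s v : List Char} {m : Nat} {dc : Char}
    (hdc : dc ∈ digitChars) (hw : ∀ c ∈ wl, c ∉ digitChars)
    (h : ¬ PySem.Chars.lower (s.take wl.length) = wl) :
    ¬ PySem.Chars.lower ((s.take m ++ dc :: v).take wl.length) = wl := by
  intro hcontra
  by_cases hL : wl.length ≤ (s.take m).length
  · have h1 : (s.take m ++ dc :: v).take wl.length = s.take wl.length := by
      rw [List.take_append]
      have h2 : wl.length - (s.take m).length = 0 := by omega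
      rw [h2, List.take_zero, List.append_nil, List.take_take]
      have h3 : min wl.length m = wl.length := by
        simp only [List.length_take] at hL
        omega
      rw [h3]
    rw [h1] at hcontra
    exact h hcontra
  · replace hL := Nat.lt_of_not_le hL
    have h1 : (s.take m ++ dc :: v).take wl.length
        = s.take m ++ dc :: v.take (wl.length - (s.take m).length - 1) := by
      rw [List.take_append, List.take_of_length_le (le_of_lt hL)]
      congr 1
      have h2 : wl.length - (s.take m).length = (wl.length - (s.take m).length - 1) + 1 := by omega
      rw [h2, List.take_succ_cons]
      simp
    rw [h1] at hcontra
    have hmem : PySem.Chars.lowerChar dc ∈ wl := by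
      rw [← hcontra]
      simp [PySem.Chars.lower]
    rw [lowerChar_digit dc hdc] at hmem
    exact hw dc hmem hdc

lemma bMatch_barrier {s : List Char} (v : List Char) (m : Nat) {dc : Char}
    (hdc : dc ∈ digitChars) (h : bMatch s = none) :
    bMatch (s.take m ++ dc :: v) = none := by
  rw [bMatch, List.find?_eq_none] at h ⊢
  intro p hp
  have hs := h p hp
  simp only [beq_iff_eq] at hs ⊢
  exact pred_barrier hdc (pvDigits_words_nodigit p hp) hs

lemma B_loop_id {cs : List Char} (h : ∀ j, bMatch (cs.drop j) = none) : B_loop cs = cs := by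
  have := B_skip cs [] (fun j hj => by simpa using h j)
  simpa [B_loop_nil] using this

lemma main_le : ∀ n, ∀ cs : List Char, cs.length ≤ n → A_core cs = B_loop cs := by
  intro n
  induction n with
  | zero =>
    intro cs h
    have hnil : cs = [] := List.eq_nil_of_length_eq_zero (Nat.le_zero.mp h)
    subst hnil
    rw [A_core_none aLoop_nil, B_loop_nil]
  | succ n ih =>
    intro cs hlen
    cases hm : aLoop cs 0 with
    | none =>
      rw [A_core_none hm, B_loop_id (fun j => aLoop_none_bMatch hm j (Nat.zero_le _))]
    | some t =>
      obtain ⟨k, w, d⟩ := t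
      obtain ⟨hk, hfA, -, hbefore0⟩ := aLoop_some hm
      have hf : bMatch (cs.drop k) = some (w, d) := by rw [← aFind_eq_bMatch]; exact hfA
      have hbefore : ∀ j < k, bMatch (cs.drop j) = none := fun j hj => by
        rw [← aFind_eq_bMatch]; exact hbefore0 j (Nat.zero_le _) hj
      have hmem := bMatch_some_mem hf
      have hw3 : 3 ≤ w.length := (pvDigits_wordlen _ hmem).1
      have hLle : w.length ≤ cs.length - k := by
        have := bMatch_some_len hf
        simpa using this
      obtain ⟨dc, hdl⟩ : ∃ dc, (PySem.Int.toStr d).toList = [dc] := by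
        have h1 := pvDigits_dstr_len _ hmem
        rcases hl : (PySem.Int.toStr d).toList with _ | ⟨c, _ | _⟩ <;> simp_all
      have hdc : dc ∈ digitChars := pvDigits_dstr_digit _ hmem dc (by rw [hdl]; simp)
      set rest := cs.drop (k + w.length - 1) with hrest
      -- left side: A rewrites and recurses; by IH the recursive call is B_loop
      rw [A_core_some hm, hdl]
      have hlen' : (cs.take k ++ [dc] ++ rest).length ≤ n := by
        simp only [List.length_append, List.length_take, List.length_cons,
          List.length_nil, hrest, List.length_drop]
        omega
      rw [ih _ hlen']
      -- no match starts inside the rewritten prefix cs.take k ++ [dc]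
      have hklen : (cs.take k).length = k := by
        simp only [List.length_take]; omega
      have hP : ∀ j < (cs.take k ++ [dc]).length,
          bMatch (((cs.take k ++ [dc]) ++ rest).drop j) = none := by
        intro j hj
        have hjk : j ≤ k := by
          simp only [List.length_append, hklen, List.length_cons, List.length_nil] at hj
          omega
        have hdropP : ((cs.take k ++ [dc]) ++ rest).drop j
            = (cs.drop j).take (k - j) ++ dc :: rest := by
          rw [List.append_assoc, List.drop_append]
          rw [List.drop_take]
          have hz : j - (cs.take k).length = 0 := by omega
          rw [hz]
          rfl
        rw [hdropP]
        rcases Nat.lt_or_ge j k with hjk' | hjk'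
        · exact bMatch_barrier rest (k - j) hdc (hbefore j hjk')
        · have hkj0 : k - j = 0 := by omega
          have hz : (cs.drop j).take (k - j) = [] := by rw [hkj0, List.take_zero]
          rw [hz]
          have := bMatch_barrier (s := []) rest 0 hdc bMatch_nil
          simpa using this
      rw [B_skip _ _ hP]
      -- right side: B copies cs.take k, then emits the digit and continues from overlap
      have hcs : cs = cs.take k ++ cs.drop k := (List.take_append_drop k cs).symm
      have hB1 : B_loop cs = cs.take k ++ B_loop (cs.drop k) := by
        conv_lhs => rw [hcs]
        refine B_skip _ _ (fun j hj => ?_)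
        rw [← hcs]
        exact hbefore j (by omega)
      rw [hB1]
      obtain ⟨c, r, hcr⟩ : ∃ c r, cs.drop k = c :: r := by
        rcases hcr : cs.drop k with _ | ⟨c, r⟩
        · exfalso
          have hl0 : cs.length - k = 0 := by
            have := congrArg List.length hcr
            simpa using this
          omega
        · exact ⟨c, r, rfl⟩
      rw [hcr] at hf
      rw [hcr, B_loop_cons_some hf, ← hcr]
      have hdd : (cs.drop k).drop (w.length - 1) = rest := by
        rw [List.drop_drop, hrest]
        congr 1
        omega
      rw [hdd, hdl]
      simp [List.append_assoc]

theorem A_eq_B (cs : List Char) : A_core cs = B_loop cs := main_le cs.length cs le_rfl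

-- ===== VERDICT (by name: the statement is the Claim_ definition above) =====
theorem replace_string_with_digit_spec : Claim_equal_replace_string_with_digit := by
  intro line _
  unfold Spec_replace_string_with_digit replace_string_with_digit replace_string_with_digit_alt
  rw [A_eq_B]
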